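-- pv_equiv track=rewrite | github.com/henakharwa/AAI-800 | src/data/teacher_trajectories.py | extract_predicted_answer
-- ===== SOURCE A (Python) =====
-- def extract_predicted_answer(text: str) -> str:
--     for line in reversed(text.strip().split("\n")):
--         if line.strip().lower().startswith("answer:"):
--             return line.split(":", 1)[1].strip()
--     for line in reversed(text.strip().split("\n")):
--         if line.strip():
--             return line.strip()
--     return ""
-- ===== SOURCE B (Python) =====
-- def extract_predicted_answer(text: str) -> str:
--     # Single reversed pass: return on the last "answer:" line; otherwise
--     # remember the last nonempty line as fallback.
--     fallback = None
--     for line in reversed(text.strip().split("\n")):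
--         if line.strip().lower().startswith("answer:"):
--             return line.split(":", 1)[1].strip()
--         if fallback is None and line.strip():
--             fallback = line.strip()
--     return fallback if fallback is not None else ""
-- ===== Notes on version B (the rewrite author's own statement) =====
-- stated objective: alternative
-- what changed: Replaces A's two separate reversed scans (answer search, then nonempty fallback) with one reversed pass that remembers the first nonempty line seen as fallback while searching for the answer line.
import Mathlib
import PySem

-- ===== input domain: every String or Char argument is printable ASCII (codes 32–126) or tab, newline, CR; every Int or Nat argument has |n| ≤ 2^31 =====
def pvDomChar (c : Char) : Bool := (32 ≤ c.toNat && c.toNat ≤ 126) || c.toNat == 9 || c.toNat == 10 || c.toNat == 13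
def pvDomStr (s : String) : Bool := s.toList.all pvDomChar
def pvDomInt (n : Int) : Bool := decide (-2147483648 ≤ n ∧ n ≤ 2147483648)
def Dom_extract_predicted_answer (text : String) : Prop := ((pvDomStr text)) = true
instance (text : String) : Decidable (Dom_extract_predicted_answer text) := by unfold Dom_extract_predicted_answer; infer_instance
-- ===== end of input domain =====

-- B merges A's two reversed scans into one reversed pass with a fallback accumulator (alternative decomposition, same cost).

-- ===== PORT A =====
-- line.split(":", 1)[1].strip(); the [1] exists because the guard ensures the line contains ':'
def pvAnswerTail (line : String) : String :=
  PySem.Str.strip (((PySem.Str.splitMax? line ":" 1).getD []).getD 1 "")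

-- first loop of A: scan for an "answer:" line, returning its tail
def pvLoopA1 : List String → Option String
  | [] => none
  | line :: rest =>
    if PySem.Str.startswith (PySem.Str.lower (PySem.Str.strip line)) "answer:" then
      some (pvAnswerTail line)
    else pvLoopA1 rest

-- second loop of A: first nonempty (stripped) line, else ""
def pvLoopA2 : List String → String
  | [] => ""
  | line :: rest =>
    if PySem.Str.strip line ≠ "" then PySem.Str.strip line else pvLoopA2 rest

def extract_predicted_answer (text : String) : String :=
  let rl := ((PySem.Str.split? (PySem.Str.strip text) "\n").getD []).reverse
  match pvLoopA1 rl with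
  | some a => a
  | none => pvLoopA2 rl

-- ===== PORT B =====
-- single reversed pass with a fallback accumulator (None until the first nonempty line)
def pvLoopB : List String → Option String → String
  | [], fallback => fallback.getD ""
  | line :: rest, fallback =>
    if PySem.Str.startswith (PySem.Str.lower (PySem.Str.strip line)) "answer:" then
      PySem.Str.strip (((PySem.Str.splitMax? line ":" 1).getD []).getD 1 "")
    else
      pvLoopB rest
        (if fallback = none ∧ PySem.Str.strip line ≠ "" then some (PySem.Str.strip line) else fallback)

def extract_predicted_answer_alt (text : String) : String :=
  pvLoopB (((PySem.Str.split? (PySem.Str.strip text) "\n").getD []).reverse) none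

-- ===== PRECONDITION & SPEC =====
def Spec_extract_predicted_answer (text : String) (out : String) : Prop := out = extract_predicted_answer_alt text
instance (text : String) (out : String) : Decidable (Spec_extract_predicted_answer text out) := by unfold Spec_extract_predicted_answer; infer_instance

-- ===== CLAIM (what is proved, stated in full; the proofs are below) =====
def Claim_equal_extract_predicted_answer : Prop := ∀ (text : String), Dom_extract_predicted_answer text → Spec_extract_predicted_answer text (extract_predicted_answer text)

-- ===== LEMMAS AND PROOFS =====
-- loop invariant: B's single pass equals A's answer scan, falling back to the
-- remembered line (if set) and otherwise to A's second scan
theorem pvLoopB_eq (rl : List String) (fb : Option String) :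
    pvLoopB rl fb =
      match pvLoopA1 rl with
      | some a => a
      | none => match fb with
        | some f => f
        | none => pvLoopA2 rl := by
  induction rl generalizing fb with
  | nil => cases fb <;> rfl
  | cons line rest ih =>
    simp only [pvLoopB, pvLoopA1]
    by_cases hA : PySem.Str.startswith (PySem.Str.lower (PySem.Str.strip line)) "answer:" = true
    · rw [if_pos hA, if_pos hA]; simp [pvAnswerTail]
    · rw [if_neg hA, if_neg hA, ih]
      cases fb with
      | some f => simp
      | none =>
        by_cases hS : PySem.Str.strip line = "" <;> simp [hS, pvLoopA2]

-- ===== VERDICT (by name: the statement is the Claim_ definition above) =====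
theorem extract_predicted_answer_spec : Claim_equal_extract_predicted_answer := by
  intro text _
  show _ = _
  unfold extract_predicted_answer extract_predicted_answer_alt
  rw [pvLoopB_eq]
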